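-- pv_equiv track=rewrite | github.com/jayl2sw/TIL | 02_algorithm/0217/4865_글자수/4865_글자수.py | mode_char
-- ===== SOURCE A (Python) =====
-- def mode_char(candidate, arr):
--     max_count = 0
--     for char in set(candidate):     # abc
--         count = 0
--         for ch in arr:          # asdbjadb
--             if char == ch:
--                 count += 1
--         if max_count < count:
--             max_count = count
--     return max_count
-- ===== SOURCE B (Python) =====
-- def mode_char(candidate, arr):
--     candidate_set = set(candidate)
--     counts = {}
--     for ch in arr:
--         if ch in candidate_set:
--             counts[ch] = counts.get(ch, 0) + 1
--     return max(counts.values(), default=0)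
-- ===== Notes on version B (the rewrite author's own statement) =====
-- stated objective: alternative
-- what changed: B makes a single pass over arr building a frequency table of the candidate characters and takes the max of its values, instead of A's rescanning arr once per distinct candidate character.
import Mathlib
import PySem

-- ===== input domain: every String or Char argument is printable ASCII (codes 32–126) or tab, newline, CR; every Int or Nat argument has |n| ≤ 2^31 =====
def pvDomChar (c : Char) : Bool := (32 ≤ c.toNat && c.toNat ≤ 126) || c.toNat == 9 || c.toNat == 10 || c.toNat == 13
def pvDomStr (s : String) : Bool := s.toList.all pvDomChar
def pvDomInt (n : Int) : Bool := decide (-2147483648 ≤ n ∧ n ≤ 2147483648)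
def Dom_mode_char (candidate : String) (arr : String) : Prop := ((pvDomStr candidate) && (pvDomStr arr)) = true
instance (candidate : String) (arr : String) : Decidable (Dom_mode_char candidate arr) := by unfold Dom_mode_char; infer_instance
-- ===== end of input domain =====

-- B replaces A's rescan of arr per distinct candidate character by a single pass over arr
-- building a frequency table of candidate characters, then takes the max of its values.

-- ===== PORT A =====
-- for char in set(candidate): count occurrences of char in arr; keep the running max
def mode_char (candidate : String) (arr : String) : Int :=
  (PySem.Set.ofList candidate.toList).foldl
    (fun max_count char =>
      let count := arr.toList.foldl
        (fun count ch => if char == ch then count + 1 else count) (0 : Int)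
      if max_count < count then count else max_count)
    0

-- ===== PORT B =====
-- candidate_set = set(candidate); one pass over arr building counts; max(counts.values(), default=0)
def mode_char_alt (candidate : String) (arr : String) : Int :=
  let candidate_set : PySem.Set Char := PySem.Set.ofList candidate.toList
  let counts : PySem.Dict Char Int := arr.toList.foldl
    (fun counts ch =>
      if candidate_set.contains ch then counts.insert ch (counts.getD ch 0 + 1) else counts)
    PySem.Dict.empty
  PySem.List.maxD counts.values (fun v => v) 0

-- ===== PRECONDITION & SPEC =====
def Spec_mode_char (candidate : String) (arr : String) (out : Int) : Prop := out = mode_char_alt candidate arr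
instance (candidate : String) (arr : String) (out : Int) : Decidable (Spec_mode_char candidate arr out) := by unfold Spec_mode_char; infer_instance

-- ===== CLAIM (what is proved, stated in full; the proofs are below) =====
def Claim_equal_mode_char : Prop := ∀ (candidate : String) (arr : String), Dom_mode_char candidate arr → Spec_mode_char candidate arr (mode_char candidate arr)

-- ===== LEMMAS AND PROOFS =====

-- a fold that skips elements failing p is the fold over the filtered list
theorem pv_foldl_ite_filter {α β : Type} (p : α → Bool) (f : β → α → β) (l : List α)
    (init : β) :
    l.foldl (fun acc x => if p x then f acc x else acc) init = (l.filter p).foldl f init := by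
  induction l generalizing init with
  | nil => rfl
  | cons x t ih =>
    by_cases h : p x <;> simp [List.filter, h, ih]

-- A's running max, rewritten with `max` and List.count
theorem pv_mode_char_eq (candidate arr : String) :
    mode_char candidate arr =
      (PySem.Set.ofList candidate.toList).foldl
        (fun m c => max m ((arr.toList.count c : Int))) 0 := by
  unfold mode_char
  have hfun : (fun (max_count : Int) (char : Char) =>
      let count := arr.toList.foldl
        (fun count ch => if char == ch then count + 1 else count) (0 : Int)
      if max_count < count then count else max_count)
      = fun m c => max m ((arr.toList.count c : Int)) := by
    funext m c
    have hin : arr.toList.foldl (fun count ch => if c == ch then count + 1 else count) (0 : Int)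
        = (arr.toList.count c : Int) := by
      rw [PySem.List.foldl_count_if (fun ch => c == ch) arr.toList 0]
      have hcp : List.countP (fun ch => c == ch) arr.toList = arr.toList.count c := by
        simp [List.count, BEq.comm]
      omega
    show (if m < arr.toList.foldl
        (fun count ch => if c == ch then count + 1 else count) (0 : Int) then _ else m) = _
    rw [hin]
    split <;> omega
  rw [hfun]

-- B's value, rewritten as the same running max over the filtered distinct characters
theorem pv_mode_char_alt_eq (candidate arr : String) :
    mode_char_alt candidate arr =
      (PySem.Set.ofList (arr.toList.filter
          (fun ch => (PySem.Set.ofList candidate.toList).contains ch))).foldl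
        (fun m c => max m (((arr.toList.filter
          (fun ch => (PySem.Set.ofList candidate.toList).contains ch)).count c : Int))) 0 := by
  unfold mode_char_alt
  set p : Char → Bool := fun ch => (PySem.Set.ofList candidate.toList).contains ch with hp
  show PySem.List.maxD
      ((arr.toList.foldl
        (fun counts ch => if p ch then counts.insert ch (counts.getD ch 0 + 1) else counts)
        (PySem.Dict.empty : PySem.Dict Char Int)).values) (fun v => v) 0 = _
  rw [pv_foldl_ite_filter p _ arr.toList PySem.Dict.empty,
    PySem.Dict.foldl_insert_getD_add_one_eq_counter]
  set fl := arr.toList.filter p with hfl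
  have hvals : (PySem.Dict.counter fl).values
      = (PySem.Set.ofList fl).map (fun k => (fl.count k : Int)) := by
    show ((PySem.Dict.counter fl).items).map (·.2) = _
    rw [PySem.Dict.items_counter]
    simp
  rw [hvals]
  rcases hS : PySem.Set.ofList fl with _ | ⟨v, t⟩
  · rfl
  · have h0 : (0 : Int) ≤ (fl.count v : Int) := by positivity
    simp only [List.map_cons, PySem.List.maxD, PySem.List.max?_id_cons, Option.getD_some,
      List.foldl_cons, List.foldl_map]
    rw [max_eq_right h0]

theorem mode_char_agree (candidate arr : String) :
    mode_char candidate arr = mode_char_alt candidate arr := by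
  rw [pv_mode_char_eq, pv_mode_char_alt_eq]
  set p : Char → Bool := fun ch => (PySem.Set.ofList candidate.toList).contains ch with hp
  set L := PySem.Set.ofList candidate.toList with hL
  set fl := arr.toList.filter p with hfl
  set S := PySem.Set.ofList fl with hS
  set cnt : Char → Int := fun c => (arr.toList.count c : Int) with hcnt
  set cnt' : Char → Int := fun c => (fl.count c : Int) with hcnt'
  -- a character in S is a candidate character with the same count in fl and arr
  have hmemS : ∀ c, c ∈ S → p c = true ∧ cnt' c = cnt c := by
    intro c hc
    have hcfl : c ∈ fl := (PySem.Set.mem_ofList fl c).mp hc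
    have hpc : p c = true := List.of_mem_filter hcfl
    exact ⟨hpc, by simp [hcnt', hcnt, hfl, List.count_filter hpc]⟩
  -- a candidate character outside S does not occur in arr
  have hzero : ∀ c, p c = true → c ∉ S → cnt c = 0 := by
    intro c hpc hcS
    by_contra h
    have hpos : 0 < arr.toList.count c :=
      Nat.pos_of_ne_zero (fun h0 => h (by simp [hcnt, h0]))
    have hcarr : c ∈ arr.toList := List.count_pos_iff.mp hpos
    exact hcS ((PySem.Set.mem_ofList fl c).mpr (List.mem_filter.mpr ⟨hcarr, hpc⟩))
  have hA := PySem.List.le_foldl_max_int L cnt 0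
  have hB := PySem.List.le_foldl_max_int S cnt' 0
  set A := L.foldl (fun m c => max m (cnt c)) 0 with hAdef
  set B := S.foldl (fun m c => max m (cnt' c)) 0 with hBdef
  have hAmem : A = 0 ∨ ∃ c ∈ L, A = cnt c := by
    have : A = (L.map cnt).foldl max 0 := by rw [List.foldl_map]
    rcases PySem.List.foldl_max_mem (L.map cnt) 0 with h | h
    · exact Or.inl (this ▸ h)
    · rcases List.mem_map.mp (this ▸ h) with ⟨c, hc, hcv⟩
      exact Or.inr ⟨c, hc, hcv.symm⟩
  have hBmem : B = 0 ∨ ∃ c ∈ S, B = cnt' c := by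
    have : B = (S.map cnt').foldl max 0 := by rw [List.foldl_map]
    rcases PySem.List.foldl_max_mem (S.map cnt') 0 with h | h
    · exact Or.inl (this ▸ h)
    · rcases List.mem_map.mp (this ▸ h) with ⟨c, hc, hcv⟩
      exact Or.inr ⟨c, hc, hcv.symm⟩
  have hle : A ≤ B := by
    rcases hAmem with h | ⟨c, hcL, hAv⟩
    · omega
    · by_cases hcS : c ∈ S
      · have := (hmemS c hcS).2
        have := hB.2 c hcS
        omega
      · have hpc : p c = true := by
          simpa [hp, List.contains_iff_mem, hL] using hcL
        have := hzero c hpc hcS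
        omega
  have hge : B ≤ A := by
    rcases hBmem with h | ⟨c, hcS, hBv⟩
    · omega
    · have hpc := (hmemS c hcS).1
      have hcL : c ∈ L := by simpa [hp, List.contains_iff_mem, hL] using hpc
      have := (hmemS c hcS).2
      have := hA.2 c hcL
      omega
  omega

-- ===== VERDICT (by name: the statement is the Claim_ definition above) =====
theorem mode_char_spec : Claim_equal_mode_char := by
  intro candidate arr _hdom
  unfold Spec_mode_char
  exact mode_char_agree candidate arr
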